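-- pv_equiv track=rewrite | github.com/wimbeaumont/upctrl | python/pr_utils.py | decvalue2binar
-- ===== SOURCE A (Python) =====
-- def decvalue2binar(value, size):
--     err = 0
--     if value < 0:
--         value = 0
--         err = -1
--     ar = [0] * size
--     for cnt in range(size):
--         ar[cnt] = 1 if (value & 1) else 0
--         value = value >> 1
--     return err, ar
-- ===== SOURCE B (Python) =====
-- def decvalue2binar(value, size):
--     err = 0
--     if value < 0:
--         value, err = 0, -1
--     if size <= 0:
--         return err, []
--     m = value & ((1 << size) - 1)
--     s = format(m, '0{}b'.format(size))
--     return err, [1 if c == '1' else 0 for c in reversed(s)]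
-- ===== Notes on version B (the rewrite author's own statement) =====
-- stated objective: idiomatic
-- what changed: B replaces A's stateful shift-and-set loop over a preallocated array by masking the value to the low `size` bits and formatting it as a zero-padded binary string, then reversing and mapping the digits to ints.
import Mathlib
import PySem

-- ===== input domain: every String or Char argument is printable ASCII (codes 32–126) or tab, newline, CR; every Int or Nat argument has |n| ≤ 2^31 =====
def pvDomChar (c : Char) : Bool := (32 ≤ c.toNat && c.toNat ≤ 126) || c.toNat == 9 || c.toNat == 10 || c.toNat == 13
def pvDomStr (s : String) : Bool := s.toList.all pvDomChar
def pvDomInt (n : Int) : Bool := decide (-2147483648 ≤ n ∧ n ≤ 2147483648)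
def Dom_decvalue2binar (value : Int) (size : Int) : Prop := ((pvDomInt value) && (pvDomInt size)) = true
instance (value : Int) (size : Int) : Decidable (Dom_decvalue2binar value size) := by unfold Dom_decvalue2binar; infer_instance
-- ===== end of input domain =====

-- B replaces A's stateful shift-and-set loop by mask + zero-padded binary string formatting,
-- reversed and mapped to ints (objective: idiomatic; same cost).


-- ===== PORT A =====
-- Literal port of A: `value & 1` is ported as `PySem.Int.mod value 2` and `value >> 1` as
-- `PySem.Int.floordiv value 2`; both are exact for every Python int (two's complement).
def decvalue2binar (value : Int) (size : Int) : Int × List Int :=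
  -- err = 0; if value < 0: value = 0; err = -1
  let vE : Int × Int := if value < 0 then ((0 : Int), (-1 : Int)) else (value, 0)
  -- ar = [0] * size  ([] when size <= 0, exactly as in Python)
  let ar : List Int := List.replicate size.toNat 0
  -- for cnt in range(size): ar[cnt] = 1 if (value & 1) else 0; value = value >> 1
  let r := (PySem.List.pyRange 0 size 1).foldl
      (fun (st : List Int × Int) (cnt : Int) =>
        (st.1.set cnt.toNat (if PySem.Int.mod st.2 2 ≠ 0 then 1 else 0),
         PySem.Int.floordiv st.2 2))
      (ar, vE.1)
  (vE.2, r.1)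

-- ===== PORT B =====
-- format(n, '0{w}b') for 0 ≤ n < 2^w: exactly w binary digits, MSB first, zero-padded.
-- (B only calls it with n = m.toNat < 2^size, where format produces exactly `size` digits.)
def fmtPad (n : Nat) (w : Nat) : List Char :=
  match w with
  | 0 => []
  | Nat.succ w' => fmtPad (n / 2) w' ++ [if n % 2 = 1 then '1' else '0']

def decvalue2binar_alt (value : Int) (size : Int) : Int × List Int :=
  let vE : Int × Int := if value < 0 then ((0 : Int), (-1 : Int)) else (value, 0)
  if size ≤ 0 then (vE.2, [])
  else
    -- m = value & ((1 << size) - 1); exact as emod since vE.1 ≥ 0 here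
    let m : Int := vE.1 % (2 ^ size.toNat)
    let s : List Char := fmtPad m.toNat size.toNat
    (vE.2, s.reverse.map (fun c => if c = '1' then (1 : Int) else 0))

-- ===== PRECONDITION & SPEC =====
def Spec_decvalue2binar (value : Int) (size : Int) (out : Int × List Int) : Prop := out = decvalue2binar_alt value size
instance (value : Int) (size : Int) (out : Int × List Int) : Decidable (Spec_decvalue2binar value size out) := by unfold Spec_decvalue2binar; infer_instance

-- ===== CLAIM (what is proved, stated in full; the proofs are below) =====
def Claim_equal_decvalue2binar : Prop := ∀ (value : Int) (size : Int), Dom_decvalue2binar value size → Spec_decvalue2binar value size (decvalue2binar value size)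

-- ===== LEMMAS AND PROOFS =====

-- reference: the low `w` bits of `v`, LSB first
def bitsI (v : Int) (w : Nat) : List Int :=
  match w with
  | 0 => []
  | Nat.succ w' => v % 2 :: bitsI (v / 2) w'

lemma emod_pow_succ_ediv_two (v : Int) (w : Nat) :
    (v % 2 ^ (w + 1)) / 2 = (v / 2) % 2 ^ w := by
  have hpow : (2 : Int) ^ (w + 1) = 2 * 2 ^ w := by ring
  rw [hpow]
  have key : v / 2 / 2 ^ w = v / (2 * 2 ^ w) :=
    Int.ediv_ediv_of_nonneg (by norm_num)
  rw [Int.emod_def v (2 * 2 ^ w), Int.emod_def (v / 2) (2 ^ w), key]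
  have hsplit : 2 * 2 ^ w * (v / (2 * 2 ^ w)) = 2 * (2 ^ w * (v / (2 * 2 ^ w))) := by ring
  rw [hsplit]
  omega

lemma bits_mod_pow (w : Nat) (v : Int) : bitsI (v % 2 ^ w) w = bitsI v w := by
  induction w generalizing v with
  | zero => rfl
  | succ w ih =>
    simp only [bitsI]
    congr 1
    · exact Int.emod_emod_of_dvd v ⟨2 ^ w, by ring⟩
    · rw [emod_pow_succ_ediv_two, ih]

lemma fmtPad_reverse (w : Nat) (n : Nat) :
    (fmtPad n w).reverse.map (fun c => if c = '1' then (1 : Int) else 0) = bitsI (n : Int) w := by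
  induction w generalizing n with
  | zero => rfl
  | succ w ih =>
    simp only [fmtPad, List.reverse_append, List.reverse_cons, List.reverse_nil,
      List.nil_append, List.cons_append, List.map_cons, bitsI]
    congr 1
    · rcases Nat.mod_two_eq_zero_or_one n with h | h <;> simp [h] <;> omega
    · rw [ih]
      have hc : ((n / 2 : Nat) : Int) = (n : Int) / 2 := by omega
      rw [hc]

lemma set_take_succ (ar : List Int) : ∀ (a : Nat) (b : Int), a < ar.length →
    (ar.set a b).take (a + 1) = ar.take a ++ [b] := by
  induction ar with
  | nil => intro a b h; simp at h
  | cons x xs ih =>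
    intro a b h
    cases a with
    | zero => simp
    | succ a =>
      simp only [List.set_cons_succ, List.take_succ_cons, List.cons_append]
      rw [ih a b (by simpa using h)]

lemma foldA (w : Nat) : ∀ (a : Nat) (v : Int) (ar : List Int), ar.length = a + w →
    ((PySem.List.pyRange (a : Int) ((a : Int) + ((w : Nat) : Int)) 1).foldl
      (fun (st : List Int × Int) (cnt : Int) =>
        (st.1.set cnt.toNat (if PySem.Int.mod st.2 2 ≠ 0 then 1 else 0),
         PySem.Int.floordiv st.2 2))
      (ar, v)).1
      = ar.take a ++ bitsI v w := by
  induction w with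
  | zero =>
    intro a v ar hlen
    rw [PySem.List.pyRange_one_eq_nil (by push_cast; omega)]
    simp only [List.foldl_nil, bitsI, List.append_nil]
    exact (List.take_of_length_le (by omega)).symm
  | succ w ih =>
    intro a v ar hlen
    rw [PySem.List.pyRange_one_cons (by push_cast; omega)]
    simp only [List.foldl_cons]
    have hend : (a : Int) + ((w + 1 : Nat) : Int) = ((a + 1 : Nat) : Int) + ((w : Nat) : Int) := by
      push_cast; ring
    have hcast : ((a : Int) + 1) = ((a + 1 : Nat) : Int) := by push_cast; ring
    rw [hend, hcast]
    have hb : (if PySem.Int.mod v 2 ≠ 0 then (1 : Int) else 0) = v % 2 := by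
      rw [PySem.Int.mod_eq_emod_of_pos (by omega)]
      omega
    have hd : PySem.Int.floordiv v 2 = v / 2 := PySem.Int.floordiv_eq_ediv_of_pos (by omega)
    have hstep := ih (a + 1) (v / 2)
      (ar.set (a : Int).toNat (if PySem.Int.mod v 2 ≠ 0 then 1 else 0))
      (by rw [List.length_set, hlen]; omega)
    rw [hd, hstep]
    have ha : (a : Int).toNat = a := Int.toNat_natCast a
    rw [ha, set_take_succ ar a _ (by omega), hb, List.append_assoc]
    rfl

-- ===== VERDICT (by name: the statement is the Claim_ definition above) =====
theorem decvalue2binar_spec : Claim_equal_decvalue2binar := by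
  intro value size _
  unfold Spec_decvalue2binar decvalue2binar decvalue2binar_alt
  by_cases hs : size ≤ 0
  · simp only [hs, if_true]
    rw [PySem.List.pyRange_one_eq_nil (by omega)]
    have h0 : size.toNat = 0 := by omega
    simp [h0]
  · simp only [hs, if_false]
    set vE : Int × Int := if value < 0 then ((0 : Int), (-1 : Int)) else (value, 0) with hvE
    have hsz : ((size.toNat : Nat) : Int) = size := by omega
    have hr : PySem.List.pyRange 0 size 1
        = PySem.List.pyRange (((0 : Nat) : Nat) : Int) ((((0 : Nat) : Nat) : Int) + ((size.toNat : Nat) : Int)) 1 := by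
      norm_num [hsz]
    rw [hr, foldA size.toNat 0 vE.1 (List.replicate size.toNat 0) (by simp)]
    simp only [List.take_zero, List.nil_append]
    congr 1
    have hm : 0 ≤ vE.1 % 2 ^ size.toNat := Int.emod_nonneg _ (by positivity)
    rw [fmtPad_reverse, Int.toNat_of_nonneg hm, bits_mod_pow]
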